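-- pv_equiv track=rewrite | github.com/abhiabhi94/line-flow | .scripts/generate_fixes.py | has_dups
-- ===== SOURCE A (Python) =====
-- def has_dups(edges):
--     s = set()
--     for a, b in edges:
--         k = (min(a, b), max(a, b))
--         if k in s:
--             return True
--         s.add(k)
--     return False
-- ===== SOURCE B (Python) =====
-- def has_dups(edges):
--     keys = [(min(a, b), max(a, b)) for a, b in edges]
--     while keys:
--         k = keys.pop()
--         if k in keys:
--             return True
--     return False
-- ===== Notes on version B (the rewrite author's own statement) =====
-- stated objective: alternative
-- what changed: B keeps no set at all: it materialises the canonical (min,max) keys, then repeatedly pops the last key and tests list membership in the remaining prefix, a destructive quadratic all-pairs scan instead of A's incremental hash-set pass.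
import Mathlib
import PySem

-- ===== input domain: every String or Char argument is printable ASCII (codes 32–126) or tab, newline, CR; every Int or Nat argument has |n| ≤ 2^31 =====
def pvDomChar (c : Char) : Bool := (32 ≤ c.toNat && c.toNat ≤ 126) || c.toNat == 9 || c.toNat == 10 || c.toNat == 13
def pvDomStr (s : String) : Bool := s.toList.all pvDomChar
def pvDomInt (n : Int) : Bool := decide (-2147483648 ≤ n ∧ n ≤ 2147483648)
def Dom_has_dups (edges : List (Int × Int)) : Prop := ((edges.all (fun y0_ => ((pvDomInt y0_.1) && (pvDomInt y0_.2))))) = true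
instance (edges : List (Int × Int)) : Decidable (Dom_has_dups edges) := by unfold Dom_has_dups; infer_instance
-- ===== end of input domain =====

-- B drops A's auxiliary set entirely: it builds the canonical keys and then repeatedly pops
-- the last key, testing membership in the remaining prefix (objective: alternative algorithm).

-- ===== PORT A =====
-- A's loop: running set s, early return True on a repeated canonical key.
def has_dups_go (s : PySem.Set (Int × Int)) (l : List (Int × Int)) : Bool :=
  match l with
  | [] => false
  | (a, b) :: t =>
    let k := (min a b, max a b)
    if PySem.Set.contains s k then true
    else has_dups_go (PySem.Set.add s k) t

def has_dups (edges : List (Int × Int)) : Bool :=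
  has_dups_go PySem.Set.empty edges

-- ===== PORT B =====
-- B's while loop: 'while keys: k = keys.pop(); if k in keys: return True' — pop? with
-- Python's default index -1; the loop ends (returns False) exactly when keys is empty.
def has_dups_pop_loop (keys : List (Int × Int)) : Bool :=
  match h : PySem.List.pop? keys (-1) with
  | none => false
  | some kr => if kr.2.contains kr.1 then true else has_dups_pop_loop kr.2
termination_by keys.length
decreasing_by
  have := PySem.List.length_of_pop?_eq_some keys h
  omega

def has_dups_alt (edges : List (Int × Int)) : Bool :=
  has_dups_pop_loop (edges.map (fun p => (min p.1 p.2, max p.1 p.2)))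

-- ===== PRECONDITION & SPEC =====
def Spec_has_dups (edges : List (Int × Int)) (out : Bool) : Prop := out = has_dups_alt edges
instance (edges : List (Int × Int)) (out : Bool) : Decidable (Spec_has_dups edges out) := by unfold Spec_has_dups; infer_instance

-- ===== CLAIM (what is proved, stated in full; the proofs are below) =====
def Claim_equal_has_dups : Prop := ∀ (edges : List (Int × Int)), Dom_has_dups edges → Spec_has_dups edges (has_dups edges)

-- ===== LEMMAS AND PROOFS =====

theorem pv_contains_iff (s : PySem.Set (Int × Int)) (k : Int × Int) :
    PySem.Set.contains s k = true ↔ k ∈ s := by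
  simp [PySem.Set.contains]

theorem pv_nodup_concat (ys : List (Int × Int)) (y : Int × Int) :
    (ys ++ [y]).Nodup ↔ ys.Nodup ∧ y ∉ ys := by
  rw [List.nodup_append]
  constructor
  · rintro ⟨h1, -, h3⟩
    exact ⟨h1, fun hy => h3 y hy y List.mem_cons_self rfl⟩
  · rintro ⟨h1, h2⟩
    refine ⟨h1, List.nodup_singleton _, fun a ha b hb => ?_⟩
    rcases List.mem_singleton.mp hb with rfl
    exact fun he => h2 (he ▸ ha)

-- A's loop returns true iff the accumulated set followed by the remaining keys has a repeat.
theorem has_dups_go_iff (l : List (Int × Int)) :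
    ∀ (s : PySem.Set (Int × Int)), s.Nodup →
      (has_dups_go s l = true ↔ ¬ (s ++ l.map (fun p => (min p.1 p.2, max p.1 p.2))).Nodup) := by
  induction l with
  | nil =>
    intro s hs
    simp [has_dups_go, hs]
  | cons hd t ih =>
    intro s hs
    obtain ⟨a, b⟩ := hd
    by_cases hk : PySem.Set.contains s (min a b, max a b) = true
    · have hmem : (min a b, max a b) ∈ s := (pv_contains_iff s _).mp hk
      have hnot : ¬ (s ++ ((a, b) :: t).map (fun p => (min p.1 p.2, max p.1 p.2))).Nodup := by
        intro h
        exact (List.disjoint_of_nodup_append h) hmem List.mem_cons_self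
      simp only [has_dups_go, List.map_cons]
      rw [if_pos hk]
      exact iff_of_true rfl hnot
    · have hmem : (min a b, max a b) ∉ s := fun h => hk ((pv_contains_iff s _).mpr h)
      have hadd : PySem.Set.add s (min a b, max a b) = s ++ [(min a b, max a b)] :=
        PySem.Set.add_of_not_mem hmem
      have hs' : (s ++ [(min a b, max a b)]).Nodup :=
        (pv_nodup_concat s _).mpr ⟨hs, hmem⟩
      have hstep : has_dups_go s ((a, b) :: t) = has_dups_go (s ++ [(min a b, max a b)]) t := by
        simp only [has_dups_go]
        rw [if_neg hk, hadd]
      rw [hstep, ih _ hs', List.map_cons]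
      constructor
      · intro h hnd
        exact h (by simpa [List.append_assoc] using hnd)
      · intro h hnd
        exact h (by simpa [List.append_assoc] using hnd)

-- unfolding equations for B's pop loop
theorem pop_loop_nil : has_dups_pop_loop [] = false := by
  rw [has_dups_pop_loop.eq_def]
  split
  · rfl
  next kr h => simp [PySem.List.pop?, PySem.List.pyIdx?] at h

theorem pop_loop_concat (ys : List (Int × Int)) (y : Int × Int) :
    has_dups_pop_loop (ys ++ [y]) =
      if ys.contains y then true else has_dups_pop_loop ys := by
  rw [has_dups_pop_loop.eq_def]
  split
  next h =>
    rw [PySem.List.pop?_last] at h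
    cases h
  next kr h =>
    rw [PySem.List.pop?_last] at h
    cases h
    rfl

-- B's pop loop returns true iff the key list has a repeat.
theorem has_dups_pop_loop_iff (ks : List (Int × Int)) :
    has_dups_pop_loop ks = true ↔ ¬ ks.Nodup := by
  induction ks using List.reverseRecOn with
  | nil =>
    simp [pop_loop_nil]
  | append_singleton ys y ih =>
    rw [pop_loop_concat, pv_nodup_concat]
    by_cases hy : y ∈ ys
    · simp [hy]
    · simp [ih, hy]

-- ===== VERDICT (by name: the statement is the Claim_ definition above) =====
theorem has_dups_spec : Claim_equal_has_dups := by
  intro edges _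
  unfold Spec_has_dups has_dups has_dups_alt
  simp only [PySem.Set.empty]
  have hA := has_dups_go_iff edges PySem.Set.empty (by simp [PySem.Set.empty])
  simp only [PySem.Set.empty, List.nil_append] at hA
  have hB := has_dups_pop_loop_iff (edges.map (fun p => (min p.1 p.2, max p.1 p.2)))
  by_cases h : (edges.map (fun p => (min p.1 p.2, max p.1 p.2))).Nodup
  · have hgo : has_dups_go [] edges = false := by
      cases hgo : has_dups_go [] edges
      · rfl
      · exact absurd h (hA.mp hgo)
    have hpop : has_dups_pop_loop (edges.map (fun p => (min p.1 p.2, max p.1 p.2))) = false := by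
      cases hpop : has_dups_pop_loop (edges.map (fun p => (min p.1 p.2, max p.1 p.2)))
      · rfl
      · exact absurd h (hB.mp hpop)
    rw [hgo, hpop]
  · rw [hA.mpr h, hB.mpr h]
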